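-- pv_equiv track=rewrite | github.com/andrei-barinov/programming_tasks | Задачи по программированию/Символы и строки 2/Интересный перевод.py | getDigitArr
-- ===== SOURCE A (Python) =====
-- def getDigitArr(string):
--     arrDigit = [];
--     newArrDigit = [];
--     for i in range(len(string)):
--         if i == 0:
--             if string[i].isdigit():
--                 arrDigit.append(string[i]);
--                 continue;
--         if string[i].isdigit() and string[i-1].isdigit():
--             arrDigit[len(arrDigit)-1] += string[i];
--             continue;
--         if string[i].isdigit():
--             arrDigit.append(string[i]);
--     for j in range(len(arrDigit)):
--         newArrDigit.append([arrDigit[j], getDoubleDigit(int(arrDigit[j]))]);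
--     return newArrDigit;
--
-- def getDoubleDigit(digit):
--     arrDouble = [];
--     stringDouble = '';
--     if int(digit) == 1 or int(digit) == 0:
--         return str(digit);
--     else:
--         while digit >= 2:
--             result = digit % 2;
--             arrDouble.append(result);
--             digit //= 2;
--             if digit == 0 or digit == 1:
--                 arrDouble.append(digit);
--     for i in range(len(arrDouble)-1, -1, -1):
--         stringDouble += str(arrDouble[i]);
--     return stringDouble;
-- ===== SOURCE B (Python) =====
-- def getDigitArr(string):
--     # One pass with a current-group accumulator; binary via format(...,'b')
--     # instead of A's index-lookback state machine + manual division loop.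
--     out = []
--     g = ''
--     for ch in string:
--         if ch.isdigit():
--             g += ch
--         else:
--             if g:
--                 out.append([g, format(int(g), 'b')])
--             g = ''
--     if g:
--         out.append([g, format(int(g), 'b')])
--     return out
-- ===== Notes on version B (the rewrite author's own statement) =====
-- stated objective: simpler
-- what changed: A single pass with a current-group accumulator replaces A's index-lookback state machine plus a second indexing pass, and the built-in binary formatting of int replaces A's manual division/bit-list/reverse loop.
import Mathlib
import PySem

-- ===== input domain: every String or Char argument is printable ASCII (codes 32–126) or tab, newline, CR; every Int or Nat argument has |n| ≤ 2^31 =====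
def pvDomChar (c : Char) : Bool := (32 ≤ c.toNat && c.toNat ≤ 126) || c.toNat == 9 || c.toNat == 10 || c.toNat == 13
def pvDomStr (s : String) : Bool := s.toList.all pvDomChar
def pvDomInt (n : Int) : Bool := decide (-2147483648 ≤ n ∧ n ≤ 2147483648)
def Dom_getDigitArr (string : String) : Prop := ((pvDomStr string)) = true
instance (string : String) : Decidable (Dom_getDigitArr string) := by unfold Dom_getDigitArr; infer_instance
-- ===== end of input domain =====

-- B replaces A's index-lookback tokenizer and manual division loop by a one-pass
-- accumulator using Python's built-in binary formatting; objective: simpler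
-- (a timing run also measured B faster by a constant factor).

-- ===== PORT A =====

-- while digit >= 2: append digit % 2; digit //= 2; if digit in (0,1): append digit
def gddLoop (digit : Int) (arrDouble : List Int) : List Int :=
  if _h : 2 ≤ digit then
    let result := PySem.Int.mod digit 2
    let arr1 := arrDouble ++ [result]
    let d := PySem.Int.floordiv digit 2
    let arr2 := if d = 0 ∨ d = 1 then arr1 ++ [d] else arr1
    gddLoop d arr2
  else arrDouble
termination_by digit.toNat
decreasing_by
  rw [PySem.Int.floordiv_eq_ediv_of_pos (by omega : (0:Int) < 2)]
  omega

def getDoubleDigit (digit : Int) : String :=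
  if digit = 1 ∨ digit = 0 then PySem.Int.toStr digit
  else
    let arrDouble := gddLoop digit []
    -- for i in range(len(arrDouble)-1, -1, -1): stringDouble += str(arrDouble[i])
    String.ofList ((PySem.List.pyRange ((arrDouble.length : Int) - 1) (-1) (-1)).foldl
      (fun sd i => sd ++ PySem.Int.toChars ((PySem.List.pyGet? arrDouble i).getD 0)) [])

-- the body of A's first loop (one iteration, index i); 'continue' = else-chain
def bodyA (cs : List Char) (arr : List (List Char)) (i : Nat) : List (List Char) :=
  match PySem.List.pyGet? cs (i : Int) with
  | none => arr
  | some c =>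
    if i = 0 ∧ PySem.Chars.isdigit c then arr ++ [[c]]
    else if PySem.Chars.isdigit c &&
        (match PySem.List.pyGet? cs ((i : Int) - 1) with
         | some p => PySem.Chars.isdigit p
         | none => false) then
      arr.dropLast ++ [arr.getLastD [] ++ [c]]
    else if PySem.Chars.isdigit c then arr ++ [[c]]
    else arr

def getDigitArr (string : String) : List (List String) :=
  let cs := string.toList
  let arrDigit := (List.range cs.length).foldl (bodyA cs) []
  (List.range arrDigit.length).foldl
    (fun newArr (j : Nat) =>
      let g := (PySem.List.pyGet? arrDigit (j : Int)).getD []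
      newArr ++ [[String.ofList g, getDoubleDigit ((PySem.Int.ofChars? g).getD 0)]]) []

-- ===== PORT B =====

-- out.append([g, format(int(g), 'b')])
def pairB (g : List Char) : List String :=
  [String.ofList g, PySem.Int.toBin ((PySem.Int.ofChars? g).getD 0)]

def stepB (st : List (List String) × List Char) (ch : Char) : List (List String) × List Char :=
  if PySem.Chars.isdigit ch then (st.1, st.2 ++ [ch])
  else if st.2 = [] then (st.1, [])
  else (st.1 ++ [pairB st.2], [])

def getDigitArr_alt (string : String) : List (List String) :=
  let r := string.toList.foldl stepB ([], [])
  if r.2 = [] then r.1 else r.1 ++ [pairB r.2]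

-- ===== PRECONDITION & SPEC =====
def Spec_getDigitArr (string : String) (out : List (List String)) : Prop := out = getDigitArr_alt string
instance (string : String) (out : List (List String)) : Decidable (Spec_getDigitArr string out) := by unfold Spec_getDigitArr; infer_instance

-- ===== CLAIM (what is proved, stated in full; the proofs are below) =====
def Claim_equal_getDigitArr : Prop := ∀ (string : String), Dom_getDigitArr string → Spec_getDigitArr string (getDigitArr string)

-- ===== LEMMAS AND PROOFS =====

-- is the previous character a digit?
def pdig : Option Char → Bool
  | some p => PySem.Chars.isdigit p
  | none => false

-- structural reformulation of A's first loop, carrying the previous character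
def phaseA : Option Char → List Char → List (List Char) → List (List Char)
  | _, [], arr => arr
  | prev, c :: rest, arr =>
    phaseA (some c) rest
      (if PySem.Chars.isdigit c && pdig prev then arr.dropLast ++ [arr.getLastD [] ++ [c]]
       else if PySem.Chars.isdigit c then arr ++ [[c]]
       else arr)

-- maximal digit runs, with the currently open run as accumulator
def runsP : List Char → List Char → List (List Char)
  | [], cur => if cur = [] then [] else [cur]
  | c :: rest, cur =>
    if PySem.Chars.isdigit c then runsP rest (cur ++ [c])
    else if cur = [] then runsP rest [] else cur :: runsP rest []

lemma foldA_eq : ∀ (cs pre : List Char) (arr : List (List Char)),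
    (List.range' pre.length cs.length).foldl (bodyA (pre ++ cs)) arr = phaseA pre.getLast? cs arr := by
  intro cs
  induction cs with
  | nil => intro pre arr; simp [phaseA]
  | cons c rest ih =>
    intro pre arr
    simp only [List.length_cons]
    rw [List.range'_succ, List.foldl_cons]
    have hstep : bodyA (pre ++ c :: rest) arr pre.length =
        (if PySem.Chars.isdigit c && pdig pre.getLast? then arr.dropLast ++ [arr.getLastD [] ++ [c]]
         else if PySem.Chars.isdigit c then arr ++ [[c]]
         else arr) := by
      unfold bodyA
      rw [PySem.List.pyGet?_append_length]
      rcases pre.eq_nil_or_concat with rfl | ⟨pre', p, rfl⟩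
      · simp only [List.length_nil, List.getLast?_nil, pdig]
        cases hc : PySem.Chars.isdigit c <;> simp [hc]
      · simp only [List.concat_eq_append]
        have hlen : (((pre' ++ [p]).length : Int)) - 1 = (pre'.length : Int) := by
          simp
        have hfull : (pre' ++ [p]) ++ c :: rest = pre' ++ p :: (c :: rest) := by
          simp
        rw [hlen, hfull, PySem.List.pyGet?_append_length, List.getLast?_concat]
        simp only [pdig]
        rw [if_neg (by simp)]
        rfl
    rw [hstep]
    have hpre : (pre ++ [c]).length = pre.length + 1 := by simp
    have := ih (pre ++ [c])
      (if PySem.Chars.isdigit c && pdig pre.getLast? then arr.dropLast ++ [arr.getLastD [] ++ [c]]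
       else if PySem.Chars.isdigit c then arr ++ [[c]]
       else arr)
    rw [hpre, List.getLast?_concat, List.append_assoc] at this
    simpa [phaseA] using this

lemma phaseA_runs : ∀ (cs : List Char),
    (∀ (arr0 : List (List Char)) (prev : Option Char), pdig prev = false →
      phaseA prev cs arr0 = arr0 ++ runsP cs []) ∧
    (∀ (arr0 : List (List Char)) (g : List Char) (p : Char),
      PySem.Chars.isdigit p = true → g ≠ [] →
      phaseA (some p) cs (arr0 ++ [g]) = arr0 ++ runsP cs g) := by
  intro cs
  induction cs with
  | nil =>
    constructor
    · intro arr0 prev _; simp [phaseA, runsP]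
    · intro arr0 g p _ hg; simp [phaseA, runsP, hg]
  | cons c rest ih =>
    obtain ⟨ih1, ih2⟩ := ih
    constructor
    · intro arr0 prev hprev
      by_cases hc : PySem.Chars.isdigit c = true
      · have : phaseA prev (c :: rest) arr0 = phaseA (some c) rest (arr0 ++ [[c]]) := by
          simp [phaseA, hprev, hc]
        rw [this, ih2 arr0 [c] c hc (by simp)]
        simp [runsP, hc]
      · have hc' : PySem.Chars.isdigit c = false := by simpa using hc
        have : phaseA prev (c :: rest) arr0 = phaseA (some c) rest arr0 := by
          simp [phaseA, hprev, hc']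
        rw [this, ih1 arr0 (some c) (by simp [pdig, hc'])]
        simp [runsP, hc']
    · intro arr0 g p hp hg
      by_cases hc : PySem.Chars.isdigit c = true
      · have : phaseA (some p) (c :: rest) (arr0 ++ [g]) =
            phaseA (some c) rest (arr0 ++ [g ++ [c]]) := by
          simp [phaseA, pdig, hp, hc]
        rw [this, ih2 arr0 (g ++ [c]) c hc (by simp)]
        simp [runsP, hc]
      · have hc' : PySem.Chars.isdigit c = false := by simpa using hc
        have : phaseA (some p) (c :: rest) (arr0 ++ [g]) =
            phaseA (some c) rest (arr0 ++ [g]) := by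
          simp [phaseA, pdig, hc']
        rw [this, ih1 (arr0 ++ [g]) (some c) (by simp [pdig, hc'])]
        simp [runsP, hc', hg]

lemma foldB_eq : ∀ (cs : List Char) (out : List (List String)) (g : List Char),
    (let r := cs.foldl stepB (out, g);
     if r.2 = [] then r.1 else r.1 ++ [pairB r.2]) = out ++ (runsP cs g).map pairB := by
  intro cs
  induction cs with
  | nil =>
    intro out g
    by_cases hg : g = [] <;> simp [runsP, hg]
  | cons c rest ih =>
    intro out g
    by_cases hc : PySem.Chars.isdigit c = true
    · simp only [List.foldl_cons, stepB, hc, if_true]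
      rw [ih out (g ++ [c])]
      simp [runsP, hc]
    · have hc' : PySem.Chars.isdigit c = false := by simpa using hc
      by_cases hg : g = []
      · simp only [List.foldl_cons, stepB, hc', Bool.false_eq_true, if_false, hg, if_true]
        rw [ih out []]
        simp [runsP, hc']
      · simp only [List.foldl_cons, stepB, hc', Bool.false_eq_true, if_false, hg]
        rw [ih (out ++ [pairB g]) []]
        simp [runsP, hc', hg]

lemma runsP_digits : ∀ (cs cur : List Char), (∀ c ∈ cur, PySem.Chars.isdigit c = true) →
    ∀ g ∈ runsP cs cur, g ≠ [] ∧ ∀ c ∈ g, PySem.Chars.isdigit c = true := by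
  intro cs
  induction cs with
  | nil =>
    intro cur hcur g hg
    by_cases h : cur = [] <;> simp [runsP, h] at hg
    subst hg; exact ⟨h, hcur⟩
  | cons c rest ih =>
    intro cur hcur g hg
    by_cases hc : PySem.Chars.isdigit c = true
    · simp only [runsP, hc, if_true] at hg
      exact ih (cur ++ [c]) (by intro x hx; rcases List.mem_append.1 hx with h | h
                                · exact hcur x h
                                · simp at h; subst h; exact hc) g hg
    · have hc' : PySem.Chars.isdigit c = false := by simpa using hc
      by_cases hcur0 : cur = []
      · simp only [runsP, hc', Bool.false_eq_true, if_false, hcur0, if_true] at hg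
        exact ih [] (by simp) g hg
      · simp only [runsP, hc', Bool.false_eq_true, if_false, if_neg hcur0, List.mem_cons] at hg
        rcases hg with rfl | hg
        · exact ⟨hcur0, hcur⟩
        · exact ih [] (by simp) g hg

lemma isdigit_facts {c : Char} (h : PySem.Chars.isdigit c = true) :
    PySem.Int.isIntSpace c = false ∧ c ≠ '-' ∧ c ≠ '+' := by
  simp only [PySem.Chars.isdigit, Bool.and_eq_true, decide_eq_true_eq] at h
  obtain ⟨h1, h2⟩ := h
  have h1' : 48 ≤ c.toNat := h1
  have h2' : c.toNat ≤ 57 := h2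
  refine ⟨?_, ?_, ?_⟩
  · simp only [PySem.Int.isIntSpace, Bool.or_eq_false_iff, decide_eq_false_iff_not]
    refine ⟨⟨⟨⟨⟨?_, ?_⟩, ?_⟩, ?_⟩, ?_⟩, ?_⟩ <;>
      (rintro rfl; revert h1' h2'; decide)
  · rintro rfl; revert h1' h2'; decide
  · rintro rfl; revert h1' h2'; decide

lemma nonneg_aux (o : Option Nat) :
    0 ≤ (Option.map (fun (n : Int) => n) (do let a ← o; pure ((a : Int)))).getD 0 := by
  cases o <;> simp

lemma ofChars_nonneg (g : List Char) (hg : g ≠ [])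
    (hd : ∀ c ∈ g, PySem.Chars.isdigit c = true) : 0 ≤ (PySem.Int.ofChars? g).getD 0 := by
  obtain ⟨c, rest, rfl⟩ : ∃ c rest, g = c :: rest := by
    cases g with
    | nil => exact absurd rfl hg
    | cons a b => exact ⟨a, b, rfl⟩
  have hc := hd c (by simp)
  have hdrop1 : List.dropWhile PySem.Int.isIntSpace (c :: rest) = c :: rest := by
    simp [(isdigit_facts hc).1]
  obtain ⟨d, t, hrev⟩ : ∃ d t, (c :: rest).reverse = d :: t := by
    rcases h : (c :: rest).reverse with _ | ⟨d, t⟩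
    · exfalso
      have := congrArg List.length h
      simp at this
    · exact ⟨d, t, rfl⟩
  have hdmem : d ∈ c :: rest := by
    have hm : d ∈ (c :: rest).reverse := by rw [hrev]; exact List.mem_cons_self
    rw [List.mem_reverse] at hm
    exact hm
  have hdrop2 : List.dropWhile PySem.Int.isIntSpace (c :: rest).reverse = (c :: rest).reverse := by
    rw [hrev]; simp [(isdigit_facts (hd d hdmem)).1]
  have hcm : c ≠ '-' := (isdigit_facts hc).2.1
  have hcp : c ≠ '+' := (isdigit_facts hc).2.2
  unfold PySem.Int.ofChars?
  rw [hdrop1, hdrop2, List.reverse_reverse]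
  dsimp only
  split
  · rename_i ds heq
    rw [List.cons.injEq] at heq
    exact absurd heq.1 hcm
  · rename_i ds heq
    rw [List.cons.injEq] at heq
    exact absurd heq.1 hcp
  · exact nonneg_aux _

-- little-endian bits of m (including the leading bit), as Ints
def bitsLE (m : Nat) : List Int :=
  if m < 2 then [(m : Int)] else ((m % 2 : Nat) : Int) :: bitsLE (m / 2)
decreasing_by omega

lemma gddLoop_eq : ∀ (m : Nat), 2 ≤ m → ∀ (acc : List Int),
    gddLoop (m : Int) acc = acc ++ bitsLE m := by
  intro m
  induction m using Nat.strong_induction_on with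
  | _ m ih =>
    intro hm acc
    rw [gddLoop]
    have h2 : (2 : Int) ≤ (m : Int) := by exact_mod_cast hm
    rw [dif_pos h2]
    have hmod : PySem.Int.mod (m : Int) 2 = ((m % 2 : Nat) : Int) := by
      rw [PySem.Int.mod_eq_emod_of_pos (by omega)]; push_cast; omega
    have hdiv : PySem.Int.floordiv (m : Int) 2 = ((m / 2 : Nat) : Int) := by
      rw [PySem.Int.floordiv_eq_ediv_of_pos (by omega)]; push_cast; omega
    simp only [hmod, hdiv]
    have hb : bitsLE m = ((m % 2 : Nat) : Int) :: bitsLE (m / 2) := by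
      rw [bitsLE, if_neg (by omega)]
    by_cases hd1 : m / 2 = 1
    · rw [if_pos (by rw [hd1]; right; rfl)]
      rw [hd1]
      rw [gddLoop]
      rw [dif_neg (by norm_num)]
      rw [hb, hd1]
      have h1 : bitsLE 1 = [(1 : Int)] := by rw [bitsLE]; norm_num
      rw [h1]
      simp
    · have hd2 : 2 ≤ m / 2 := by omega
      rw [if_neg (by push_cast; omega)]
      rw [ih (m / 2) (by omega) hd2 (acc ++ [((m % 2 : Nat) : Int)])]
      rw [hb]
      simp

lemma toChars_bit (b : Nat) (hb : b < 2) : PySem.Int.toChars ((b : Nat) : Int) = [Nat.digitChar b] := by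
  interval_cases b <;> decide

lemma bitsLE_rev_toDigits : ∀ (m : Nat), 1 ≤ m →
    ((bitsLE m).reverse.map PySem.Int.toChars).flatten = Nat.toDigits 2 m := by
  intro m
  induction m using Nat.strong_induction_on with
  | _ m ih =>
    intro hm
    by_cases h2 : m < 2
    · have h1 : m = 1 := by omega
      subst h1
      rw [bitsLE]
      decide
    · rw [bitsLE, if_neg h2]
      rw [Nat.toDigits_eq_if (by omega), if_neg h2]
      have ihm := ih (m / 2) (by omega) (by omega)
      simp only [List.reverse_cons, List.map_append, List.flatten_append, ihm,
        List.map_cons, List.map_nil, List.flatten_cons, List.flatten_nil]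
      rw [toChars_bit (m % 2) (by omega)]
      simp

lemma pyRange_down (n : Nat) :
    PySem.List.pyRange ((n : Int) - 1) (-1) (-1) =
      (List.range n).map (fun (k : Nat) => (n : Int) - 1 - (k : Int)) := by
  unfold PySem.List.pyRange
  rw [if_neg (by norm_num)]
  dsimp only
  rw [if_neg (by norm_num)]
  by_cases hn : n = 0
  · subst hn; norm_num
  · rw [if_pos (by omega)]
    have hcount : ((((n : Int) - 1) - (-1) + -(-1) - 1) / -(-1)).toNat = n := by
      norm_num
    rw [hcount]
    apply List.map_congr_left
    intro k _
    ring

lemma revFold_eq (xs : List Int) :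
    (PySem.List.pyRange ((xs.length : Int) - 1) (-1) (-1)).foldl
      (fun sd i => sd ++ PySem.Int.toChars ((PySem.List.pyGet? xs i).getD 0)) [] =
    (xs.reverse.map PySem.Int.toChars).flatten := by
  rw [pyRange_down, List.foldl_map, PySem.List.foldl_append_eq_flatMap]
  rw [List.nil_append, List.flatMap_def]
  congr 1
  apply List.ext_getElem (by simp)
  intro k hk1 hk2
  simp only [List.length_map, List.length_range] at hk1
  simp only [List.getElem_map, List.getElem_range, List.getElem_reverse]
  have hidx : (xs.length : Int) - 1 - (k : Int) = ((xs.length - 1 - k : Nat) : Int) := by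
    omega
  rw [hidx, PySem.List.pyGet?_natCast, List.getElem?_eq_getElem (by omega)]
  simp only [Option.getD_some]

lemma gdd_eq_toBin (n : Int) (hn : 0 ≤ n) : getDoubleDigit n = PySem.Int.toBin n := by
  by_cases h01 : n = 1 ∨ n = 0
  · rcases h01 with rfl | rfl <;> decide
  · have h2 : 2 ≤ n := by omega
    unfold getDoubleDigit
    rw [if_neg h01]
    have hloop : gddLoop n [] = bitsLE n.toNat := by
      have hcast : n = ((n.toNat : Nat) : Int) := by omega
      conv_lhs => rw [hcast]
      rw [gddLoop_eq n.toNat (by omega) []]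
      simp
    rw [hloop]
    dsimp only
    unfold PySem.Int.toBin PySem.Int.toBinChars
    rw [if_neg (by omega)]
    congr 1
    rw [revFold_eq, bitsLE_rev_toDigits n.toNat (by omega)]

lemma phase2_eq (arrDigit : List (List Char)) :
    (List.range arrDigit.length).foldl
      (fun newArr (j : Nat) =>
        let g := (PySem.List.pyGet? arrDigit (j : Int)).getD []
        newArr ++ [[String.ofList g, getDoubleDigit ((PySem.Int.ofChars? g).getD 0)]]) [] =
    arrDigit.map (fun g => [String.ofList g, getDoubleDigit ((PySem.Int.ofChars? g).getD 0)]) := by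
  rw [PySem.List.foldl_append_singleton_eq_map, List.nil_append]
  apply List.ext_getElem (by simp)
  intro k hk1 hk2
  simp only [List.length_map, List.length_range] at hk1
  simp only [List.getElem_map, List.getElem_range, PySem.List.pyGet?_natCast]
  rw [List.getElem?_eq_getElem hk1]
  simp

-- ===== VERDICT (by name: the statement is the Claim_ definition above) =====
theorem getDigitArr_spec : Claim_equal_getDigitArr := by
  intro s _
  unfold Spec_getDigitArr getDigitArr getDigitArr_alt
  dsimp only
  rw [phase2_eq]
  have hA : (List.range s.toList.length).foldl (bodyA s.toList) ([] : List (List Char)) =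
      runsP s.toList [] := by
    have := foldA_eq s.toList [] []
    simp only [List.length_nil, List.nil_append, List.getLast?_nil] at this
    rw [List.range_eq_range', this]
    exact (phaseA_runs s.toList).1 [] none rfl
  rw [hA, foldB_eq s.toList [] []]
  rw [List.nil_append]
  apply List.map_congr_left
  intro g hg
  obtain ⟨hne, hdig⟩ := runsP_digits s.toList [] (by simp) g hg
  unfold pairB
  rw [gdd_eq_toBin _ (ofChars_nonneg g hne hdig)]
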